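-- pv_equiv track=rewrite | github.com/uowoolab/CSD-cleaner | clean_csd_mofs.py | get_block
-- ===== SOURCE A (Python) =====
-- def get_block(cif_lines, keyword, start):
--
--     """
--     Separate a cif into blocks based on "loop_" sections.
--
--         Parameters:
--             cif_lines (list of str): list of lines in cif file
--             keyword (str): keyword identifying block (e.g., "atom" for atoms
--                        "symmetry" for symmetry operations, "geom" for geometry
--                        (bonding) information, etc.)
--             start (int): the line number of beginning of block (line after "loop_")
--
--         Returns:
--             block (list of str): list of lines in the "block" from the cif
--     """
--
--     for num, line in enumerate(cif_lines[start:]):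
--         if line[0] == "_" and line.strip("\n").split("_")[1] != keyword:
--             end = num + start
--             break
--     try:
--         block = cif_lines[start:end]
--     except UnboundLocalError:
--         block = cif_lines[start:]
--     # Remove any "loop_" lines
--     block = [val for val in block if val != "loop_\n"]
--
--     return block
-- ===== SOURCE B (Python) =====
-- def get_block(cif_lines, keyword, start):
--     block = []
--     for line in cif_lines[start:]:
--         if line[0] == "_" and line.strip("\n").split("_")[1] != keyword:
--             break
--         if line != "loop_\n":
--             block.append(line)
--     return block
-- ===== Notes on version B (the rewrite author's own statement) =====
-- stated objective: simpler
-- what changed: A finds a boundary index with an enumerate scan, re-slices the list with a try/except around a possibly-unbound end, and filters 'loop_' lines in a second comprehension pass; B is one accumulation loop over cif_lines[start:] that appends each non-'loop_' line and breaks at the first mismatched keyword line, so the boundary search, the slice and the filter pass disappear.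
-- intended difference: When start < -len(cif_lines) and the scan reaches a mismatched-keyword line, A computes the block end as a slice-relative offset but applies it to the whole list, returning an accidentally truncated (often empty) block, e.g. [] on (['a\n','_b_x\n'],'c',-3); B returns the lines actually scanned before the mismatch (['a\n']), which is the intended block. — e.g. on get_block(["a\n", "_b_x\n"], "c", -3): A returns [], B returns ["a\n"]
import Mathlib
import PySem

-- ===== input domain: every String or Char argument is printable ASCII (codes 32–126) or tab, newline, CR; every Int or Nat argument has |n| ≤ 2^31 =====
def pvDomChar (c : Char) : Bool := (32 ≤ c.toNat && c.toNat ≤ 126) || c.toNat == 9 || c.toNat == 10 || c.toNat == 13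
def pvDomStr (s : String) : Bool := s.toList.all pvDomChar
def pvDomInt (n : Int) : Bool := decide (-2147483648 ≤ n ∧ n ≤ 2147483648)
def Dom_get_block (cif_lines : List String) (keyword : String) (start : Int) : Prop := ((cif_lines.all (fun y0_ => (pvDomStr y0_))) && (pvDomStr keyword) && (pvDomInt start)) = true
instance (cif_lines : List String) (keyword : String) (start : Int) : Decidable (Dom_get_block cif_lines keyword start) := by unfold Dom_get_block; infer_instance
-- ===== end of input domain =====

-- B replaces A's boundary-scan + re-slice + try/except + filter comprehension by one accumulation
-- loop (objective: simpler); return-value equivalence only, neither program mutates its arguments.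

-- ===== PORT A =====
-- the test `line[0] == "_" and line.strip("\n").split("_")[1] != keyword`, shared verbatim by both
-- Pythons; `none` = IndexError on an empty line (excluded by Pre_), `[1]` always exists when the
-- first character is '_' so pyGetD's default is unreachable there
def pvBoundary (keyword line : String) : Bool :=
  match PySem.Str.pyGet? line 0 with
  | none => false
  | some c =>
    c == '_' &&
      !(PySem.List.pyGetD ((PySem.Str.split? (PySem.Str.stripChars line "\n") "_").getD []) 1 "" == keyword)

-- `for num, line in enumerate(cif_lines[start:]): … end = num + start; break` — the counter starts
-- at `start` so the returned value is `end` itself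
def pvFindEnd (keyword : String) : List String → Int → Option Int
  | [], _ => none
  | l :: ls, num => if pvBoundary keyword l then some num else pvFindEnd keyword ls (num + 1)

def get_block (cif_lines : List String) (keyword : String) (start : Int) : List String :=
  let sl := PySem.List.slice cif_lines (some start) none
  let block :=
    match pvFindEnd keyword sl start with
    | some e => PySem.List.slice cif_lines (some start) (some e)   -- block = cif_lines[start:end]
    | none => sl                                                   -- UnboundLocalError path
  block.filter (fun v => v != "loop_\n")

-- ===== PORT B =====
def pvCollect (keyword : String) : List String → List String → List String
  | [], block => block
  | l :: ls, block =>
    if pvBoundary keyword l then block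
    else pvCollect keyword ls (if l == "loop_\n" then block else block ++ [l])

def get_block_alt (cif_lines : List String) (keyword : String) (start : Int) : List String :=
  pvCollect keyword (PySem.List.slice cif_lines (some start) none) []

-- ===== PRECONDITION & SPEC =====
-- Pre_ excludes exactly the inputs where A raises IndexError: an empty line scanned before the
-- first boundary line of cif_lines[start:] (B raises there too).
def Pre_get_block (cif_lines : List String) (keyword : String) (start : Int) : Prop :=
  ∀ i < (PySem.List.slice cif_lines (some start) none).length,
    (∀ j < i, pvBoundary keyword ((PySem.List.slice cif_lines (some start) none).getD j "") = false) →
    (PySem.List.slice cif_lines (some start) none).getD i "" ≠ ""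

instance (cif_lines : List String) (keyword : String) (start : Int) : Decidable (Pre_get_block cif_lines keyword start) := by unfold Pre_get_block; infer_instance

def pvWitness_get_block : List String × String × Int := (["loop_\n", "x\n", "_a_y\n", ""], "b", 1)

-- When start < -len(cif_lines) and the scan reaches a mismatched-keyword line, A computes the block
-- end as a slice-relative offset but applies it to the whole list, returning an accidentally
-- truncated (often empty) block; B returns the lines actually scanned before the mismatch, which is
-- the intended block.
def D_get_block (cif_lines : List String) (keyword : String) (start : Int) : Prop :=
  start + cif_lines.length < 0 ∧
  ∃ k < cif_lines.length,
    pvBoundary keyword (cif_lines.getD k "") = true ∧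
    (∀ i < k, pvBoundary keyword (cif_lines.getD i "") = false) ∧
    ∃ j < k, (cif_lines.length : Int) + start + k ≤ j ∧ cif_lines.getD j "" ≠ "loop_\n"

instance (cif_lines : List String) (keyword : String) (start : Int) : Decidable (D_get_block cif_lines keyword start) := by unfold D_get_block; infer_instance

def Spec_get_block (cif_lines : List String) (keyword : String) (start : Int) (out : List String) : Prop := ¬ D_get_block cif_lines keyword start → out = get_block_alt cif_lines keyword start
instance (cif_lines : List String) (keyword : String) (start : Int) (out : List String) : Decidable (Spec_get_block cif_lines keyword start out) := by unfold Spec_get_block; infer_instance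

def pvDiffWitness_get_block : List String × String × Int := (["a\n", "_b_x\n"], "c", -3)
def pvDiffWitnessOut_get_block : (List String) × (List String) := ([], ["a\n"])

-- ===== CLAIM (what is proved, stated in full; the proofs are below) =====
def Claim_unchanged_get_block : Prop := ∀ (cif_lines : List String) (keyword : String) (start : Int), Dom_get_block cif_lines keyword start → Pre_get_block cif_lines keyword start → Spec_get_block cif_lines keyword start (get_block cif_lines keyword start)
def Claim_changed_get_block : Prop := Dom_get_block (pvDiffWitness_get_block.1) (pvDiffWitness_get_block.2.1) (pvDiffWitness_get_block.2.2) ∧ Pre_get_block (pvDiffWitness_get_block.1) (pvDiffWitness_get_block.2.1) (pvDiffWitness_get_block.2.2) ∧ D_get_block (pvDiffWitness_get_block.1) (pvDiffWitness_get_block.2.1) (pvDiffWitness_get_block.2.2) ∧ get_block (pvDiffWitness_get_block.1) (pvDiffWitness_get_block.2.1) (pvDiffWitness_get_block.2.2) = pvDiffWitnessOut_get_block.1 ∧ get_block_alt (pvDiffWitness_get_block.1) (pvDiffWitness_get_block.2.1) (pvDiffWitness_get_block.2.2) = pvDiffWitnessOut_get_block.2 ∧ pvDiffWitnessOut_get_block.1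 ≠ pvDiffWitnessOut_get_block.2
def Claim_exact_get_block : Prop := ∀ (cif_lines : List String) (keyword : String) (start : Int), Dom_get_block cif_lines keyword start → Pre_get_block cif_lines keyword start → D_get_block cif_lines keyword start → get_block cif_lines keyword start ≠ get_block_alt cif_lines keyword start

-- ===== LEMMAS AND PROOFS =====

theorem pvCollect_eq (kw : String) (ls acc : List String) :
    pvCollect kw ls acc =
      acc ++ (ls.take (ls.findIdx (pvBoundary kw))).filter (fun v => v != "loop_\n") := by
  induction ls generalizing acc with
  | nil => simp [pvCollect]
  | cons l ls ih =>
    rw [pvCollect, List.findIdx_cons]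
    by_cases hb : pvBoundary kw l
    · simp [hb]
    · simp only [hb, cond_false, List.take_succ_cons, List.filter_cons]
      by_cases hl : l = "loop_\n"
      · simp [hl, ih]
      · simp only [beq_iff_eq, hl, if_false, ih, bne_iff_ne, ne_eq, not_false_iff]
        simp [List.append_assoc]

theorem pvFindEnd_eq (kw : String) (ls : List String) (c : Int) :
    pvFindEnd kw ls c =
      if ls.findIdx (pvBoundary kw) < ls.length then some (c + ls.findIdx (pvBoundary kw)) else none := by
  induction ls generalizing c with
  | nil => simp [pvFindEnd]
  | cons l ls ih =>
    rw [pvFindEnd, List.findIdx_cons]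
    by_cases hb : pvBoundary kw l
    · simp [hb]
    · simp only [hb, cond_false, List.length_cons]
      rw [ih (c + 1)]
      by_cases h : ls.findIdx (pvBoundary kw) < ls.length
      · simp only [h, if_true, if_pos (by omega : ls.findIdx (pvBoundary kw) + 1 < ls.length + 1)]
        have : (c + 1) + (ls.findIdx (pvBoundary kw) : Int) = c + ((ls.findIdx (pvBoundary kw) + 1 : Nat) : Int) := by push_cast; ring
        rw [this]
        simp
      · simp only [h, if_false, if_neg (by omega : ¬ (ls.findIdx (pvBoundary kw) + 1 < ls.length + 1))]
        simp

theorem pvClamp_zero (n : Nat) (start : Int) (h : start + n < 0) :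
    PySem.List.clampIdx n start = 0 := by
  unfold PySem.List.clampIdx; split_ifs <;> omega

theorem pvSlice_take (xs : List String) (start : Int) (k : Nat)
    (hge : -(xs.length : Int) ≤ start)
    (hk : k < xs.length - PySem.List.clampIdx xs.length start) :
    PySem.List.slice xs (some start) (some (start + k)) =
      (xs.drop (PySem.List.clampIdx xs.length start)).take k := by
  have hclamp : PySem.List.clampIdx xs.length (start + k) = PySem.List.clampIdx xs.length start + k := by
    unfold PySem.List.clampIdx at hk ⊢; split_ifs at hk ⊢ <;> omega
  simp [PySem.List.slice, hclamp]

theorem pvFilter_take_eq (xs : List String) (m k : Nat) (hmk : m ≤ k) (hk : k ≤ xs.length)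
    (hmid : ∀ j, m ≤ j → j < k → xs.getD j "" = "loop_\n") :
    (xs.take m).filter (fun v => v != "loop_\n") = (xs.take k).filter (fun v => v != "loop_\n") := by
  have hsplit : xs.take k = xs.take m ++ ((xs.drop m).take (k - m)) := by
    rw [← List.take_add]; congr 1; omega
  rw [hsplit, List.filter_append]
  suffices h : ((xs.drop m).take (k - m)).filter (fun v => v != "loop_\n") = [] by simp [h]
  rw [List.filter_eq_nil_iff]
  intro a ha
  obtain ⟨i, hi, rfl⟩ := List.mem_iff_getElem.mp ha
  have hilen : m + i < xs.length := by
    have := hi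
    simp [List.length_take, List.length_drop] at this
    omega
  have : ((xs.drop m).take (k - m))[i] = xs[m + i] := by
    rw [List.getElem_take, List.getElem_drop]
  rw [this]
  have heq := hmid (m + i) (by omega) (by
    have := hi
    simp [List.length_take, List.length_drop] at this
    omega)
  rw [List.getD_eq_getElem xs "" hilen] at heq
  simp [heq]

-- ===== VERDICT (by name: the statement is the Claim_ definition above) =====
theorem get_block_spec : Claim_unchanged_get_block := by
  intro xs kw start _hdom _hpre hnd
  simp only [get_block, get_block_alt]
  rw [pvCollect_eq, pvFindEnd_eq, PySem.List.slice_some_none, List.nil_append]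
  by_cases h : (xs.drop (PySem.List.clampIdx xs.length start)).findIdx (pvBoundary kw) <
      (xs.drop (PySem.List.clampIdx xs.length start)).length
  · rw [if_pos h]
    simp only []
    by_cases hge : -(xs.length : Int) ≤ start
    · rw [pvSlice_take xs start _ hge (by simpa using h)]
    · have ha0 : PySem.List.clampIdx xs.length start = 0 :=
        pvClamp_zero xs.length start (by omega)
      rw [ha0] at h ⊢
      rw [List.drop_zero] at h ⊢
      set k := xs.findIdx (pvBoundary kw) with hkdef
      have hklen : k < xs.length := by simpa using h
      have hslice : PySem.List.slice xs (some start) (some (start + (k : Int))) =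
          xs.take (PySem.List.clampIdx xs.length (start + (k : Int))) := by
        simp [PySem.List.slice, ha0]
      rw [hslice]
      set m := PySem.List.clampIdx xs.length (start + (k : Int)) with hm
      have hmle : ∀ i : Nat, m ≤ i → ((xs.length : Int) + start + k ≤ i) := by
        intro i hi
        rw [hm] at hi
        unfold PySem.List.clampIdx at hi
        split_ifs at hi <;> omega
      have hmk : m ≤ k := by
        rw [hm]; unfold PySem.List.clampIdx; split_ifs <;> omega
      -- from ¬ D_, the lines between A's accidental cut and the boundary are all "loop_\n"
      have hmid : ∀ i, m ≤ i → i < k → xs.getD i "" = "loop_\n" := by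
        intro i him hik
        by_contra hne
        apply hnd
        refine ⟨by omega, k, hklen, ?_, ?_, i, hik, hmle i him, hne⟩
        · rw [List.getD_eq_getElem xs "" hklen]
          exact List.findIdx_getElem (w := hklen)
        · intro i' hik'
          rw [List.getD_eq_getElem xs "" (by omega)]
          exact List.not_of_lt_findIdx (by rw [← hkdef]; omega)
      exact pvFilter_take_eq xs m k hmk (by omega) hmid
  · rw [if_neg h]
    simp only []
    have hle := List.findIdx_le_length (p := pvBoundary kw)
      (xs := xs.drop (PySem.List.clampIdx xs.length start))
    rw [List.take_of_length_le (by omega)]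

theorem get_block_changed : Claim_changed_get_block := by unfold Claim_changed_get_block; decide
theorem get_block_tight : Claim_exact_get_block := by
  intro xs kw start _hdom _hpre hd
  obtain ⟨h1, k', hk', hbd, hmin, j, hjk, hjge, hjne⟩ := hd
  simp only [get_block, get_block_alt]
  rw [pvCollect_eq, pvFindEnd_eq, PySem.List.slice_some_none, List.nil_append]
  have ha0 : PySem.List.clampIdx xs.length start = 0 :=
    pvClamp_zero xs.length start (by omega)
  rw [ha0, List.drop_zero]
  set k := xs.findIdx (pvBoundary kw) with hkdef
  have hkk : k = k' := by
    have hle : k ≤ k' := by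
      by_contra hlt
      have hfalse := List.not_of_lt_findIdx (p := pvBoundary kw) (xs := xs) (i := k')
        (by rw [← hkdef]; omega)
      have hbd2 : pvBoundary kw xs[k'] = true := by
        rw [List.getD_eq_getElem xs "" hk'] at hbd; exact hbd
      exact Bool.false_ne_true (hfalse.symm.trans hbd2)
    have hge2 : k' ≤ k := by
      by_contra hlt
      have hfl : xs.findIdx (pvBoundary kw) < xs.length := by rw [← hkdef]; omega
      have hgb : pvBoundary kw (xs.getD (xs.findIdx (pvBoundary kw)) "") = true := by
        rw [List.getD_eq_getElem xs "" hfl]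
        exact List.findIdx_getElem (w := hfl)
      rw [← hkdef] at hgb
      rw [hmin k (by omega)] at hgb
      exact Bool.false_ne_true hgb
    omega
  have hklen : k < xs.length := by omega
  rw [if_pos hklen]
  simp only []
  have hslice : PySem.List.slice xs (some start) (some (start + (k : Int))) =
      xs.take (PySem.List.clampIdx xs.length (start + (k : Int))) := by
    simp [PySem.List.slice, ha0]
  rw [hslice]
  set m := PySem.List.clampIdx xs.length (start + (k : Int)) with hm
  have hjm : m ≤ j := by
    rw [hm]; unfold PySem.List.clampIdx; split_ifs <;> omega
  have hmk : m ≤ k := by omega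
  -- B's block is A's block followed by the filtered middle segment, which contains
  -- the non-"loop_" line xs[j], so the two blocks have different lengths
  have hsplit : xs.take k = xs.take m ++ ((xs.drop m).take (k - m)) := by
    rw [← List.take_add]; congr 1; omega
  have hjlen : j < xs.length := by omega
  have hidx : j - m < ((xs.drop m).take (k - m)).length := by
    simp [List.length_take, List.length_drop]; omega
  have hmem : xs[j] ∈ (xs.drop m).take (k - m) := by
    have hel : ((xs.drop m).take (k - m))[j - m] = xs[j] := by
      rw [List.getElem_take, List.getElem_drop]
      congr 1
      omega
    rw [← hel]
    exact List.getElem_mem hidx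
  have hjne' : xs[j] ≠ "loop_\n" := by
    rwa [List.getD_eq_getElem xs "" hjlen] at hjne
  have hmemf : xs[j] ∈ ((xs.drop m).take (k - m)).filter (fun v => v != "loop_\n") :=
    List.mem_filter.mpr ⟨hmem, by simp [hjne']⟩
  intro heq
  rw [hsplit, List.filter_append] at heq
  have hlen := congrArg List.length heq
  rw [List.length_append] at hlen
  have hpos : 0 < (((xs.drop m).take (k - m)).filter (fun v => v != "loop_\n")).length :=
    List.length_pos_of_ne_nil (List.ne_nil_of_mem hmemf)
  omega
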